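-- pv_equiv track=rewrite | github.com/astromid/algorithms-structures-course | algorithms_sc/sorts/bitonic.py | bitonic_merge
-- ===== SOURCE A (Python) =====
-- from typing import List, Optional
--
-- def bitonic_merge(lst: List[int], left_idx: int, size: int, ascending: bool = True) -> List[int]:
--     if size > 1:
--         half_size = size // 2
--         for idx in range(left_idx, left_idx + half_size):
--             if (ascending and lst[idx] > lst[idx + half_size]) or (not ascending and lst[idx] < lst[idx + half_size]):
--                 lst[idx], lst[idx + half_size] = lst[idx + half_size], lst[idx]
--         lst = bitonic_merge(lst, left_idx, half_size, ascending)
--         lst = bitonic_merge(lst, left_idx + half_size, half_size, ascending)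
--     return lst
-- ===== SOURCE B (Python) =====
-- def bitonic_merge(lst, left_idx, size, ascending=True):
--     # Iterative version: explicit LIFO stack of (left, size) frames replaces the recursion.
--     # Mutates lst in place (as A does) and returns the same list object.
--     stack = [(left_idx, size)]
--     while stack:
--         l, s = stack.pop()
--         if s > 1:
--             h = s // 2
--             for idx in range(l, l + h):
--                 if (ascending and lst[idx] > lst[idx + h]) or (not ascending and lst[idx] < lst[idx + h]):
--                     lst[idx], lst[idx + h] = lst[idx + h], lst[idx]
--             stack.append((l + h, h))
--             stack.append((l, h))
--     return lst
-- ===== Notes on version B (the rewrite author's own statement) =====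
-- stated objective: alternative
-- what changed: The recursion is replaced by an iterative loop over an explicit LIFO stack of (left, size) frames; each popped frame runs the same compare-exchange pass and pushes its two halves.
import Mathlib
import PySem

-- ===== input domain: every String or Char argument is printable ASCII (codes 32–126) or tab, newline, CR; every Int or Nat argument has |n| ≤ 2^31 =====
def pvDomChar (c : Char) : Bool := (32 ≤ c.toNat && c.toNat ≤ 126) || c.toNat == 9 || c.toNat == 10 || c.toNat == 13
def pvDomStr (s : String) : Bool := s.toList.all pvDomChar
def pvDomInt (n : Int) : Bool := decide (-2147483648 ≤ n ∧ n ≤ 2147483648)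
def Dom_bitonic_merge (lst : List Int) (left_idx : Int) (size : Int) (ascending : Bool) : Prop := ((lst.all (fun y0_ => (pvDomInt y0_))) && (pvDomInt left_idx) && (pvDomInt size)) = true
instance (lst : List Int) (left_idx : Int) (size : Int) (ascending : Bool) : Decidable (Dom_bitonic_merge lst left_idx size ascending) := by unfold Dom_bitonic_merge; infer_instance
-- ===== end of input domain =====

-- B replaces A's recursion by an iterative loop over an explicit LIFO stack of (left, size)
-- frames (alternative decomposition, same cost); both Pythons mutate the list in place and
-- return it — the equivalence proved here is about the returned value.

-- ===== PORT A =====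
-- shared primitive: Python's `lst[i]` read (negative index from the end); exact under Pre_
def pvGetI (xs : List Int) (i : Int) : Int := PySem.List.pyGetD xs i 0

-- one body of the inner for-loop (identical in both Pythons): the compare-exchange with
-- Python's tuple-assignment order
def pvCmpSwap (asc : Bool) (h : Int) (xs : List Int) (idx : Int) : List Int :=
  if (asc = true ∧ pvGetI xs idx > pvGetI xs (idx + h)) ∨
     (asc = false ∧ pvGetI xs idx < pvGetI xs (idx + h)) then
    -- lst[idx], lst[idx+h] = lst[idx+h], lst[idx] : RHS first, then assign left to right
    let v1 := pvGetI xs (idx + h)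
    let v2 := pvGetI xs idx
    PySem.List.pySetD (PySem.List.pySetD xs idx v1) (idx + h) v2
  else xs

-- A's recursion, with a structural fuel parameter as totality guard (size.toNat bounds the
-- recursion depth, since each call strictly shrinks size; the 0 arm is never reached)
def pvBMF : Nat → List Int → Int → Int → Bool → List Int
  | 0, lst, _, _, _ => lst
  | Nat.succ fuel, lst, left_idx, size, ascending =>
    if size > 1 then
      let half_size := PySem.Int.floordiv size 2
      let lst1 := (PySem.List.pyRange left_idx (left_idx + half_size) 1).foldl
                    (pvCmpSwap ascending half_size) lst
      let lst2 := pvBMF fuel lst1 left_idx half_size ascending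
      pvBMF fuel lst2 (left_idx + half_size) half_size ascending
    else lst

def bitonic_merge (lst : List Int) (left_idx : Int) (size : Int) (ascending : Bool) : List Int :=
  pvBMF size.toNat lst left_idx size ascending

-- ===== PORT B =====
-- the `while stack:` loop of B; the list head is the top of the LIFO stack; the fuel is a
-- structural totality guard (2*size.toNat+1 bounds the number of iterations; the 0 arm is
-- never reached)
def pvStackRunF : Nat → List (Int × Int) → List Int → Bool → List Int
  | _, [], lst, _ => lst
  | 0, _, lst, _ => lst
  | Nat.succ fuel, (l, s) :: rest, lst, asc =>
    if s > 1 then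
      let h := PySem.Int.floordiv s 2
      let lst' := (PySem.List.pyRange l (l + h) 1).foldl (pvCmpSwap asc h) lst
      -- push (l+h, h) then (l, h): the next pop takes (l, h)
      pvStackRunF fuel ((l, h) :: (l + h, h) :: rest) lst' asc
    else pvStackRunF fuel rest lst asc

def bitonic_merge_alt (lst : List Int) (left_idx : Int) (size : Int) (ascending : Bool) : List Int :=
  pvStackRunF (2 * size.toNat + 1) [(left_idx, size)] lst ascending

-- ===== PRECONDITION & SPEC =====
-- Pre_ excludes exactly the inputs on which Python A raises IndexError: size > 1 with some
-- touched raw index (they form the interval [left_idx, left_idx + 2*(size//2))) out of range.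
def Pre_bitonic_merge (lst : List Int) (left_idx : Int) (size : Int) (ascending : Bool) : Prop :=
  size ≤ 1 ∨ (-(lst.length : Int) ≤ left_idx ∧ left_idx + 2 * (size / 2) ≤ (lst.length : Int))
instance (lst : List Int) (left_idx : Int) (size : Int) (ascending : Bool) : Decidable (Pre_bitonic_merge lst left_idx size ascending) := by unfold Pre_bitonic_merge; infer_instance

def pvWitness_bitonic_merge : List Int × Int × Int × Bool := ([3, 1, 2, 4], 0, 4, true)

def Spec_bitonic_merge (lst : List Int) (left_idx : Int) (size : Int) (ascending : Bool) (out : List Int) : Prop := out = bitonic_merge_alt lst left_idx size ascending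
instance (lst : List Int) (left_idx : Int) (size : Int) (ascending : Bool) (out : List Int) : Decidable (Spec_bitonic_merge lst left_idx size ascending out) := by unfold Spec_bitonic_merge; infer_instance

-- ===== CLAIM (what is proved, stated in full; the proofs are below) =====
def Claim_equal_bitonic_merge : Prop := ∀ (lst : List Int) (left_idx : Int) (size : Int) (ascending : Bool), Dom_bitonic_merge lst left_idx size ascending → Pre_bitonic_merge lst left_idx size ascending → Spec_bitonic_merge lst left_idx size ascending (bitonic_merge lst left_idx size ascending)

-- ===== LEMMAS AND PROOFS =====

-- cost of one stack frame: an upper bound (exact for powers of two) on the number of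
-- loop iterations the frame and its descendants take; the proofs' fuel bookkeeping
def pvFrameCost (p : Int × Int) : Nat := if p.2 ≤ 1 then 1 else 2 * p.2.toNat - 1

def pvMeasure (st : List (Int × Int)) : Nat := (st.map pvFrameCost).sum

theorem pvFrameCost_pos (p : Int × Int) : 1 ≤ pvFrameCost p := by
  unfold pvFrameCost; split_ifs <;> omega

theorem pv_half (s : Int) (hs : s > 1) :
    1 ≤ PySem.Int.floordiv s 2 ∧ 2 * PySem.Int.floordiv s 2 ≤ s ∧
    (PySem.Int.floordiv s 2).toNat + 1 ≤ s.toNat := by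
  have h2 : PySem.Int.floordiv s 2 = s / 2 := PySem.Int.floordiv_eq_ediv_of_pos (by omega)
  omega

-- dead fuel: the result does not depend on the fuel once it bounds the recursion depth
theorem pvBMF_congr (f : Nat) : ∀ (f' : Nat) (s : Int) (lst : List Int) (l : Int) (asc : Bool),
    s.toNat ≤ f → s.toNat ≤ f' → pvBMF f lst l s asc = pvBMF f' lst l s asc := by
  induction f with
  | zero =>
    intro f' s lst l asc hf _
    have hs : ¬ s > 1 := by omega
    cases f' with
    | zero => rfl
    | succ g' => simp [pvBMF, hs]
  | succ g ih =>
    intro f' s lst l asc hf hf'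
    by_cases hs : s > 1
    · cases f' with
      | zero => omega
      | succ g' =>
        obtain ⟨h1, h2, h3⟩ := pv_half s hs
        simp only [pvBMF, if_pos hs]
        rw [ih g' (PySem.Int.floordiv s 2) _ l asc (by omega) (by omega),
            ih g' (PySem.Int.floordiv s 2) _ (l + PySem.Int.floordiv s 2) asc (by omega) (by omega)]
    · cases f' with
      | zero => simp [pvBMF, hs]
      | succ g' => simp [pvBMF, hs]

theorem pvMeasure_pos (l s : Int) (rest : List (Int × Int)) :
    1 ≤ pvMeasure ((l, s) :: rest) := by
  have := pvFrameCost_pos (l, s)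
  simp only [pvMeasure, List.map_cons, List.sum_cons]
  omega

theorem pvMeasure_split (l s : Int) (rest : List (Int × Int)) (hs : s > 1) :
    pvMeasure ((l, PySem.Int.floordiv s 2) :: (l + PySem.Int.floordiv s 2, PySem.Int.floordiv s 2) :: rest) + 1
      ≤ pvMeasure ((l, s) :: rest) := by
  obtain ⟨h1, h2, h3⟩ := pv_half s hs
  simp only [pvMeasure, List.map_cons, List.sum_cons, pvFrameCost]
  split_ifs <;> omega

-- dead fuel for the stack loop
theorem pvStackRunF_congr (f : Nat) : ∀ (f' : Nat) (st : List (Int × Int)) (lst : List Int)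
    (asc : Bool), pvMeasure st ≤ f → pvMeasure st ≤ f' →
    pvStackRunF f st lst asc = pvStackRunF f' st lst asc := by
  induction f with
  | zero =>
    intro f' st lst asc hf _
    match st with
    | [] => cases f' <;> rfl
    | (l, s) :: rest => have := pvMeasure_pos l s rest; omega
  | succ g ih =>
    intro f' st lst asc hf hf'
    match st with
    | [] => cases f' <;> rfl
    | (l, s) :: rest =>
      have hpos := pvMeasure_pos l s rest
      cases f' with
      | zero => omega
      | succ g' =>
        by_cases hs : s > 1
        · have hsp := pvMeasure_split l s rest hs
          simp only [pvStackRunF, if_pos hs]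
          exact ih g' _ _ asc (by omega) (by omega)
        · have hre : pvMeasure rest + 1 ≤ pvMeasure ((l, s) :: rest) := by
            have := pvFrameCost_pos (l, s)
            simp only [pvMeasure, List.map_cons, List.sum_cons]; omega
          simp only [pvStackRunF, if_neg hs]
          exact ih g' _ _ asc (by omega) (by omega)

-- popping one frame runs A's recursion on that frame
theorem pvStack_frame (n : Nat) : ∀ (s l : Int) (f : Nat) (rest : List (Int × Int))
    (lst : List Int) (asc : Bool), s.toNat ≤ n → pvMeasure ((l, s) :: rest) ≤ f →
    pvStackRunF f ((l, s) :: rest) lst asc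
      = pvStackRunF f rest (bitonic_merge lst l s asc) asc := by
  induction n with
  | zero =>
    intro s l f rest lst asc hn hf
    have hs : ¬ s > 1 := by omega
    have hm : pvMeasure rest + 1 ≤ pvMeasure ((l, s) :: rest) := by
      have := pvFrameCost_pos (l, s)
      simp only [pvMeasure, List.map_cons, List.sum_cons]; omega
    cases f with
    | zero => have := pvMeasure_pos l s rest; omega
    | succ g =>
      have hbm : bitonic_merge lst l s asc = lst := by
        have hz : s.toNat = 0 := by omega
        simp [bitonic_merge, hz, pvBMF]
      rw [hbm]
      simp only [pvStackRunF, if_neg hs]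
      exact pvStackRunF_congr g (g + 1) rest lst asc (by omega) (by omega)
  | succ m ih =>
    intro s l f rest lst asc hn hf
    cases f with
    | zero => have := pvMeasure_pos l s rest; omega
    | succ g =>
      by_cases hs : s > 1
      · obtain ⟨h1, h2, h3⟩ := pv_half s hs
        have hsp := pvMeasure_split l s rest hs
        -- size of the half-frames, for the inductive hypotheses
        have hhn : (PySem.Int.floordiv s 2).toNat ≤ m := by omega
        set h := PySem.Int.floordiv s 2 with hh
        -- unfold the stack step
        simp only [pvStackRunF, if_pos hs]
        set lst' := (PySem.List.pyRange l (l + h) 1).foldl (pvCmpSwap asc h) lst with hlst'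
        have hm2 : pvMeasure ((l + h, h) :: rest) + 1 ≤ pvMeasure ((l, h) :: (l + h, h) :: rest) := by
          have := pvFrameCost_pos (l, h)
          simp only [pvMeasure, List.map_cons, List.sum_cons]; omega
        have hm3 : pvMeasure rest + 1 ≤ pvMeasure ((l + h, h) :: rest) := by
          have := pvFrameCost_pos (l + h, h)
          simp only [pvMeasure, List.map_cons, List.sum_cons]; omega
        rw [ih h l g ((l + h, h) :: rest) lst' asc hhn (by omega)]
        rw [ih h (l + h) g rest (bitonic_merge lst' l h asc) asc hhn (by omega)]
        -- unfold A's recursion once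
        have hbm : bitonic_merge lst l s asc
            = bitonic_merge (bitonic_merge lst' l h asc) (l + h) h asc := by
          obtain ⟨k, hk⟩ : ∃ k, s.toNat = k + 1 := ⟨s.toNat - 1, by omega⟩
          simp only [bitonic_merge, hk, pvBMF, if_pos hs, ← hh, ← hlst']
          rw [pvBMF_congr k h.toNat h lst' l asc (by omega) (le_refl _),
              pvBMF_congr k h.toNat h _ (l + h) asc (by omega) (le_refl _)]
        rw [← hbm]
        exact pvStackRunF_congr g (g + 1) rest _ asc (by omega) (by omega)
      · have hm : pvMeasure rest + 1 ≤ pvMeasure ((l, s) :: rest) := by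
          have := pvFrameCost_pos (l, s)
          simp only [pvMeasure, List.map_cons, List.sum_cons]; omega
        have hbm : bitonic_merge lst l s asc = lst := by
          rcases Nat.eq_zero_or_pos s.toNat with hz | hp
          · simp [bitonic_merge, hz, pvBMF]
          · obtain ⟨k, hk⟩ : ∃ k, s.toNat = k + 1 := ⟨s.toNat - 1, by omega⟩
            simp [bitonic_merge, hk, pvBMF, hs]
        rw [hbm]
        simp only [pvStackRunF, if_neg hs]
        exact pvStackRunF_congr g (g + 1) rest lst asc (by omega) (by omega)

-- ===== VERDICT (by name: the statement is the Claim_ definition above) =====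
theorem bitonic_merge_spec : Claim_equal_bitonic_merge := by
  intro lst l s asc _ _
  unfold Spec_bitonic_merge bitonic_merge_alt
  have hm : pvMeasure [(l, s)] ≤ 2 * s.toNat + 1 := by
    simp only [pvMeasure, List.map_cons, List.map_nil, List.sum_cons, List.sum_nil, pvFrameCost]
    split_ifs <;> omega
  rw [pvStack_frame s.toNat s l (2 * s.toNat + 1) [] lst asc (le_refl _) hm]
  rfl
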